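-- pv_equiv track=rewrite | github.com/goodmonk06/ai-multi-agent-starter-kit | apps/hr_matching/main.py | _extract_skills_summary
-- ===== SOURCE A (Python) =====
-- from typing import Dict, List, Optional, Any
--
-- def _extract_skills_summary(
--
--     resume_data: Dict[str, Any]
-- ) -> Dict[str, List[str]]:
--     """スキルサマリーを抽出"""
--     skills = resume_data.get("skills", [])
--
--     # スキルをカテゴリ分け
--     technical_keywords = ["python", "java", "javascript", "sql", "aws", "docker"]
--     soft_skills_keywords = ["leadership", "communication", "teamwork"]
--
--     summary = {
--         "technical": [s for s in skills if any(k in s.lower() for k in technical_keywords)],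
--         "soft_skills": [s for s in skills if any(k in s.lower() for k in soft_skills_keywords)],
--         "other": []
--     }
--
--     # 分類されなかったスキル
--     categorized = set(summary["technical"] + summary["soft_skills"])
--     summary["other"] = [s for s in skills if s not in categorized]
--
--     return summary
-- ===== SOURCE B (Python) =====
-- def _extract_skills_summary(resume_data):
--     """Single pass over skills: classify each skill once; 'other' collects the
--     skills matching neither keyword list (no categorized-set pass)."""
--     skills = resume_data.get("skills", [])
--     technical_keywords = ["python", "java", "javascript", "sql", "aws", "docker"]
--     soft_skills_keywords = ["leadership", "communication", "teamwork"]
--     technical, soft_skills, other = [], [], []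
--     for s in skills:
--         low = s.lower()
--         is_tech = any(k in low for k in technical_keywords)
--         is_soft = any(k in low for k in soft_skills_keywords)
--         if is_tech:
--             technical.append(s)
--         if is_soft:
--             soft_skills.append(s)
--         if not is_tech and not is_soft:
--             other.append(s)
--     return {"technical": technical, "soft_skills": soft_skills, "other": other}
-- ===== Notes on version B (the rewrite author's own statement) =====
-- stated objective: simpler
-- what changed: Replaced A's three list comprehensions plus a categorized-set difference pass by one loop that lowercases each skill once, classifies it against both keyword lists, and appends to technical/soft_skills/other directly, dropping the set entirely.
import Mathlib
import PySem

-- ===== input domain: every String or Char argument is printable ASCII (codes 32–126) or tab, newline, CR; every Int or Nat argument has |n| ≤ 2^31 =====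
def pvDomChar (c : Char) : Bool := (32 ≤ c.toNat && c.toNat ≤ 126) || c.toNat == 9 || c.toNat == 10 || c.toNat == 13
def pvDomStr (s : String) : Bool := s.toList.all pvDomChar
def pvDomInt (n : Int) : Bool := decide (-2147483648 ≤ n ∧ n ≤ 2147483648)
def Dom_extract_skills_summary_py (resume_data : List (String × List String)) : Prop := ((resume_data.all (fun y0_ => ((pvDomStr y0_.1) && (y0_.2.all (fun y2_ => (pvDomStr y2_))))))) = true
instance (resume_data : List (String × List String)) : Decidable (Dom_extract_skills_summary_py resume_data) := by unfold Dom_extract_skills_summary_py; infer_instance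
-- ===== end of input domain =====

-- B is a single classifying loop over the skills (no categorized set, lower() computed once);
-- same return value as A's three comprehensions + set-difference pass.

def pvTechKeywords : List String := ["python", "java", "javascript", "sql", "aws", "docker"]
def pvSoftKeywords : List String := ["leadership", "communication", "teamwork"]

-- ===== PORT A =====
def extract_skills_summary_py (resume_data : List (String × List String)) : List (String × List String) :=
  let skills := (PySem.Dict.mk resume_data).getD "skills" []
  let technical := skills.filter (fun s => pvTechKeywords.any (fun k => PySem.Str.isIn k (PySem.Str.lower s)))
  let soft_skills := skills.filter (fun s => pvSoftKeywords.any (fun k => PySem.Str.isIn k (PySem.Str.lower s)))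
  let summary := PySem.Dict.mk [("technical", technical), ("soft_skills", soft_skills), ("other", ([] : List String))]
  let categorized := PySem.Set.ofList (technical ++ soft_skills)
  let summary := summary.insert "other" (skills.filter (fun s => !(PySem.Set.contains categorized s)))
  summary.items

-- ===== PORT B =====
def extract_skills_summary_py_alt (resume_data : List (String × List String)) : List (String × List String) :=
  let skills := (PySem.Dict.mk resume_data).getD "skills" []
  let acc := skills.foldl
    (fun (acc : List String × List String × List String) s =>
      let low := PySem.Str.lower s
      let isTech := pvTechKeywords.any (fun k => PySem.Str.isIn k low)
      let isSoft := pvSoftKeywords.any (fun k => PySem.Str.isIn k low)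
      (if isTech then acc.1 ++ [s] else acc.1,
       if isSoft then acc.2.1 ++ [s] else acc.2.1,
       if !isTech && !isSoft then acc.2.2 ++ [s] else acc.2.2))
    ([], [], [])
  [("technical", acc.1), ("soft_skills", acc.2.1), ("other", acc.2.2)]

-- ===== PRECONDITION & SPEC =====
def Spec_extract_skills_summary_py (resume_data : List (String × List String)) (out : List (String × List String)) : Prop := out = extract_skills_summary_py_alt resume_data
instance (resume_data : List (String × List String)) (out : List (String × List String)) : Decidable (Spec_extract_skills_summary_py resume_data out) := by unfold Spec_extract_skills_summary_py; infer_instance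

-- ===== CLAIM (what is proved, stated in full; the proofs are below) =====
def Claim_equal_extract_skills_summary_py : Prop := ∀ (resume_data : List (String × List String)), Dom_extract_skills_summary_py resume_data → Spec_extract_skills_summary_py resume_data (extract_skills_summary_py resume_data)

-- ===== LEMMAS AND PROOFS =====

-- B's fold accumulates exactly the three filters.
theorem pv_fold_eq (pT pS : String → Bool) :
    ∀ (skills : List String) (t so ot : List String),
    skills.foldl (fun (acc : List String × List String × List String) s =>
        (if pT s then acc.1 ++ [s] else acc.1,
         if pS s then acc.2.1 ++ [s] else acc.2.1,
         if !pT s && !pS s then acc.2.2 ++ [s] else acc.2.2)) (t, so, ot)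
      = (t ++ skills.filter pT, so ++ skills.filter pS,
         ot ++ skills.filter (fun s => !pT s && !pS s)) := by
  intro skills
  induction skills with
  | nil => intro t so ot; simp
  | cons x xs ih =>
    intro t so ot
    simp only [List.foldl_cons, List.filter_cons, ih]
    by_cases hT : pT x <;> by_cases hS : pS x <;> simp [hT, hS]

-- 'not in categorized' coincides with 'matches neither list' on elements of skills.
theorem pv_other_eq (pT pS : String → Bool) (skills : List String) :
    skills.filter (fun s => !(PySem.Set.contains
        (PySem.Set.ofList (skills.filter pT ++ skills.filter pS)) s))
      = skills.filter (fun s => !pT s && !pS s) := by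
  apply List.filter_congr
  intro s hs
  have : (PySem.Set.contains (PySem.Set.ofList (skills.filter pT ++ skills.filter pS)) s)
      = (pT s || pS s) := by
    rw [PySem.Set.contains_eq_listContains]
    by_cases hT : pT s <;> by_cases hS : pS s <;>
      simp [PySem.Set.mem_ofList, List.mem_filter, hT, hS, hs]
  simp [this, hs]

-- ===== VERDICT (by name: the statement is the Claim_ definition above) =====
theorem extract_skills_summary_py_spec : Claim_equal_extract_skills_summary_py := by
  intro resume_data _
  unfold Spec_extract_skills_summary_py extract_skills_summary_py extract_skills_summary_py_alt
  simp only [pv_fold_eq, List.nil_append]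
  rw [pv_other_eq]
  rfl
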